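-- pv_equiv track=rewrite | github.com/meelgroup/cubeprobe | codes/flash.py | constructChainFormula
-- ===== SOURCE A (Python) =====
-- def pushVar(variable, cnfClauses):
--     cnfLen = len(cnfClauses)
--     for i in range(cnfLen):
--         cnfClauses[i].append(variable)
--     return cnfClauses
--
-- def getCNF(variable, binStr, sign, origTotalVars):
--     cnfClauses = []
--     binLen = len(binStr)
--     if sign:
--         cnfClauses.append([-(binLen + 1 + origTotalVars)])
--     else:
--         cnfClauses.append([binLen + 1 + origTotalVars])
--     for i in range(binLen):
--         newVar = int(binLen - i + origTotalVars)
--         if sign == False: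
--             newVar = -1 * (binLen - i + origTotalVars)
--         if binStr[binLen - i - 1] == "0":
--             cnfClauses.append([int(-1 * newVar)])
--         else:
--             cnfClauses = pushVar(int(-1 * newVar), cnfClauses)
--     pushVar(variable, cnfClauses)
--     return cnfClauses
--
-- def constructChainFormula(originalVar, solCount, newVars, origTotalVars, invert):
--     writeLines = ""
--     binStr = str(bin(int(solCount)))[2:-1]
--     binLen = len(binStr)
--     for i in range(newVars - binLen - 1):
--         binStr = "0" + binStr
--
--     firstCNFClauses = getCNF(-int(originalVar), binStr, invert, origTotalVars)
--     addedClauseNum = 0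
--     for i in range(len(firstCNFClauses)):
--         addedClauseNum += 1
--         for j in range(len(firstCNFClauses[i])):
--             writeLines += str(firstCNFClauses[i][j]) + " "
--         writeLines += "0\n"
--     CNFClauses = []
--     for i in range(len(CNFClauses)):
--         if CNFClauses[i] in firstCNFClauses:
--             continue
--         addedClauseNum += 1
--         for j in range(len(CNFClauses[i])):
--             writeLines += str(CNFClauses[i][j]) + " "
--         writeLines += "0\n"
--     return (writeLines, addedClauseNum)
-- ===== SOURCE B (Python) =====
-- def constructChainFormula(originalVar, solCount, newVars, origTotalVars, invert):
--     binStr = str(bin(int(solCount)))[2:-1]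
--     binStr = "0" * (newVars - len(binStr) - 1) + binStr
--     n = len(binStr)
--     s = -1 if invert else 1
--     tail = -int(originalVar)
--     ones = []            # '1'-bit literals in processing order (LSB first)
--     zeros = []           # ('0'-bit literal, number of '1'-literals seen before it)
--     for i in range(n):
--         lit = s * (n - i + origTotalVars)
--         if binStr[n - i - 1] == "0":
--             zeros.append((lit, len(ones)))
--         else:
--             ones.append(lit)
--     def fmt(clause):
--         return "".join(str(x) + " " for x in clause) + "0\n"
--     writeLines = fmt([s * (n + 1 + origTotalVars)] + ones + [tail])
--     for lit, k in zeros: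
--         writeLines += fmt([lit] + ones[k:] + [tail])
--     return (writeLines, 1 + len(zeros))
-- ===== Notes on version B (the rewrite author's own statement) =====
-- stated objective: faster
-- what changed: B drops the pushVar append-a-literal-to-every-existing-clause pattern: one pass over the bits records the '1'-literals and each '0'-clause anchor with the count of '1'-literals seen before it, then every clause is emitted directly as head :: ones-suffix :: tail.
import Mathlib
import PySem

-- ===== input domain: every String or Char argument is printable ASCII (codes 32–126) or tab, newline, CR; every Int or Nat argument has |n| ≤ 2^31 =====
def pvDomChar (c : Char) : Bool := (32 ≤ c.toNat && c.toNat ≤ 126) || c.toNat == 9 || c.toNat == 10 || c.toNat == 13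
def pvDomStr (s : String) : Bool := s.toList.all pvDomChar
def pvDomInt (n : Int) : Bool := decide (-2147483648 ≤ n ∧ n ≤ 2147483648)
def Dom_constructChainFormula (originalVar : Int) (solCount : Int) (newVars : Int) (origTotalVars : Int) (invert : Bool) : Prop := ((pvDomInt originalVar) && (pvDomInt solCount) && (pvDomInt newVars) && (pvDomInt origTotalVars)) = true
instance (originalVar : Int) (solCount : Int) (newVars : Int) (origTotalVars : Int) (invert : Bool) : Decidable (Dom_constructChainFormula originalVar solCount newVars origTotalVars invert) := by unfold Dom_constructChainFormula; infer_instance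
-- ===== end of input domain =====

-- B replaces the pushVar 'append a literal to every clause so far' pattern by a single pass
-- that records '1'-literals and '0'-clause anchors and then emits each clause directly
-- (objective: alternative decomposition, same output).

-- ===== PORT A =====
def pushVar (variable_ : Int) (cnfClauses : List (List Int)) : List (List Int) :=
  cnfClauses.map (fun c => c ++ [variable_])

def getCNF (variable_ : Int) (binStr : List Char) (sign : Bool) (origTotalVars : Int) : List (List Int) :=
  let binLen := binStr.length
  let cnfClauses : List (List Int) :=
    if sign then [[-((binLen : Int) + 1 + origTotalVars)]]
    else [[(binLen : Int) + 1 + origTotalVars]]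
  let cnfClauses := (List.range binLen).foldl (fun cs (i : Nat) =>
    let newVar : Int :=
      if sign then ((binLen : Int) - (i : Int) + origTotalVars)
      else -1 * ((binLen : Int) - (i : Int) + origTotalVars)
    -- binStr[binLen - i - 1]: the index is always in range (i < binLen), so getD is exact
    if binStr.getD (binLen - i - 1 : Nat) ' ' == '0' then cs ++ [[-1 * newVar]]
    else pushVar (-1 * newVar) cs) cnfClauses
  pushVar variable_ cnfClauses

def constructChainFormula (originalVar : Int) (solCount : Int) (newVars : Int) (origTotalVars : Int) (invert : Bool) : String × Int :=
  let binStr := PySem.List.slice (PySem.Int.toBinChars0b solCount) (some 2) (some (-1))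
  let binLen := binStr.length
  let binStr := (PySem.List.pyRange 0 (newVars - (binLen : Int) - 1) 1).foldl
    (fun s _ => '0' :: s) binStr
  let firstCNFClauses := getCNF (-originalVar) binStr invert origTotalVars
  let acc := firstCNFClauses.foldl (fun (acc : List Char × Int) c =>
      (c.foldl (fun w lit => w ++ PySem.Int.toChars lit ++ [' ']) acc.1 ++ ['0', '\n'],
       acc.2 + 1)) (([] : List Char), (0 : Int))
  -- Python then loops over CNFClauses = []  (dead code, kept literally)
  let CNFClauses : List (List Int) := []
  let acc := CNFClauses.foldl (fun (acc : List Char × Int) c =>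
      if firstCNFClauses.contains c then acc
      else (c.foldl (fun w lit => w ++ PySem.Int.toChars lit ++ [' ']) acc.1 ++ ['0', '\n'],
            acc.2 + 1)) acc
  (String.ofList acc.1, acc.2)

-- ===== PORT B =====
def fmtClause (clause : List Int) : List Char :=
  clause.flatMap (fun x => PySem.Int.toChars x ++ [' ']) ++ ['0', '\n']

def constructChainFormula_alt (originalVar : Int) (solCount : Int) (newVars : Int) (origTotalVars : Int) (invert : Bool) : String × Int :=
  let binStr0 := PySem.List.slice (PySem.Int.toBinChars0b solCount) (some 2) (some (-1))
  let binStr := List.replicate (newVars - (binStr0.length : Int) - 1).toNat '0' ++ binStr0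
  let n := binStr.length
  let s : Int := if invert then -1 else 1
  let tail := -originalVar
  let acc := (List.range n).foldl (fun (acc : List Int × List (Int × Nat)) (i : Nat) =>
      let lit := s * ((n : Int) - (i : Int) + origTotalVars)
      -- binStr[n - i - 1]: always in range, so getD is exact
      if binStr.getD (n - i - 1 : Nat) ' ' == '0' then (acc.1, acc.2 ++ [(lit, acc.1.length)])
      else (acc.1 ++ [lit], acc.2)) (([] : List Int), ([] : List (Int × Nat)))
  let ones := acc.1
  let zeros := acc.2
  let writeLines := fmtClause ((s * ((n : Int) + 1 + origTotalVars)) :: (ones ++ [tail]))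
  -- ones[k:] with 0 ≤ k = a recorded list length, so List.drop is exact
  let writeLines := zeros.foldl
    (fun w p => w ++ fmtClause (p.1 :: (ones.drop p.2 ++ [tail]))) writeLines
  (String.ofList writeLines, 1 + (zeros.length : Int))

-- ===== PRECONDITION & SPEC =====
def Spec_constructChainFormula (originalVar : Int) (solCount : Int) (newVars : Int) (origTotalVars : Int) (invert : Bool) (out : String × Int) : Prop := out = constructChainFormula_alt originalVar solCount newVars origTotalVars invert
instance (originalVar : Int) (solCount : Int) (newVars : Int) (origTotalVars : Int) (invert : Bool) (out : String × Int) : Decidable (Spec_constructChainFormula originalVar solCount newVars origTotalVars invert out) := by unfold Spec_constructChainFormula; infer_instance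

-- ===== CLAIM (what is proved, stated in full; the proofs are below) =====
def Claim_equal_constructChainFormula : Prop := ∀ (originalVar : Int) (solCount : Int) (newVars : Int) (origTotalVars : Int) (invert : Bool), Dom_constructChainFormula originalVar solCount newVars origTotalVars invert → Spec_constructChainFormula originalVar solCount newVars origTotalVars invert (constructChainFormula originalVar solCount newVars origTotalVars invert)

-- ===== LEMMAS AND PROOFS =====

-- the '1'-literals of a processed bit list, in processing order
def onesOf : List (Int × Bool) → List Int
  | [] => []
  | p :: rest => if p.2 then onesOf rest else p.1 :: onesOf rest

-- the '0'-clauses (without the trailing variable), in processing order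
def zcl : List (Int × Bool) → List (List Int)
  | [] => []
  | p :: rest => if p.2 then (p.1 :: onesOf rest) :: zcl rest else zcl rest

-- the '0'-anchors with the count of '1'-literals seen before them, starting from m
def zidx (m : Nat) : List (Int × Bool) → List (Int × Nat)
  | [] => []
  | p :: rest => if p.2 then (p.1, m) :: zidx m rest else zidx (m + 1) rest

def stepA (cs : List (List Int)) (p : Int × Bool) : List (List Int) :=
  if p.2 then cs ++ [[p.1]] else cs.map (fun c => c ++ [p.1])

def stepB (acc : List Int × List (Int × Nat)) (p : Int × Bool) : List Int × List (Int × Nat) :=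
  if p.2 then (acc.1, acc.2 ++ [(p.1, acc.1.length)]) else (acc.1 ++ [p.1], acc.2)

theorem foldl_stepA (l : List (Int × Bool)) (cs : List (List Int)) :
    l.foldl stepA cs = cs.map (fun c => c ++ onesOf l) ++ zcl l := by
  induction l generalizing cs with
  | nil => simp [onesOf, zcl]
  | cons p rest ih =>
    by_cases h : p.2 = true
    · simp [stepA, h, ih, onesOf, zcl]
    · simp only [Bool.not_eq_true] at h
      simp [stepA, h, ih, onesOf, zcl, List.map_map, Function.comp, List.append_assoc]

theorem foldl_stepB (l : List (Int × Bool)) (os : List Int) (zs : List (Int × Nat)) :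
    l.foldl stepB (os, zs) = (os ++ onesOf l, zs ++ zidx os.length l) := by
  induction l generalizing os zs with
  | nil => simp [onesOf, zidx]
  | cons p rest ih =>
    by_cases h : p.2 = true
    · simp [stepB, h, ih, onesOf, zidx]
    · simp only [Bool.not_eq_true] at h
      simpa [stepB, h, onesOf, zidx, List.append_assoc] using ih (os ++ [p.1]) zs

theorem zidx_render (l : List (Int × Bool)) (os : List Int) (v : Int) :
    (zidx os.length l).map (fun p => p.1 :: ((os ++ onesOf l).drop p.2 ++ [v]))
      = (zcl l).map (fun c => c ++ [v]) := by
  induction l generalizing os with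
  | nil => simp [zidx, zcl]
  | cons p rest ih =>
    by_cases h : p.2 = true
    · simp [zidx, zcl, h, onesOf, ih]
    · simp only [Bool.not_eq_true] at h
      have := ih (os ++ [p.1])
      simp only [List.length_append, List.length_cons, List.length_nil, List.append_assoc,
        List.singleton_append] at this
      simpa [zidx, zcl, h, onesOf] using this

theorem zidx_length (m : Nat) (l : List (Int × Bool)) :
    (zidx m l).length = (zcl l).length := by
  induction l generalizing m with
  | nil => simp [zidx, zcl]
  | cons p rest ih =>
    by_cases h : p.2 = true
    · simp [zidx, zcl, h, ih]
    · simp only [Bool.not_eq_true] at h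
      simp [zidx, zcl, h, ih]

theorem pad_fold (l : List Int) (s : List Char) :
    l.foldl (fun s _ => '0' :: s) s = List.replicate l.length '0' ++ s := by
  induction l generalizing s with
  | nil => simp
  | cons a rest ih =>
    simp [List.foldl_cons, ih, List.replicate_succ']

-- rendering a clause list the way port A does = concatenating fmtClause lines, counting clauses
theorem renderA (clauses : List (List Int)) (acc : List Char × Int) :
    clauses.foldl (fun (acc : List Char × Int) c =>
        (c.foldl (fun w lit => w ++ PySem.Int.toChars lit ++ [' ']) acc.1 ++ ['0', '\n'],
         acc.2 + 1)) acc
      = (acc.1 ++ (clauses.map fmtClause).flatten, acc.2 + clauses.length) := by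
  induction clauses generalizing acc with
  | nil => simp
  | cons c rest ih =>
    have hline : c.foldl (fun w lit => w ++ PySem.Int.toChars lit ++ [' ']) acc.1
        = acc.1 ++ c.flatMap (fun x => PySem.Int.toChars x ++ [' ']) := by
      simpa [List.append_assoc] using
        PySem.List.foldl_append_eq_flatMap (fun x => PySem.Int.toChars x ++ [' ']) c acc.1
    rw [List.foldl_cons, ih, hline]
    simp [fmtClause, List.append_assoc]
    omega

theorem renderB {α : Type} (l : List α) (g : α → List Int) (w : List Char) :
    l.foldl (fun w p => w ++ fmtClause (g p)) w = w ++ (l.map (fun p => fmtClause (g p))).flatten := by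
  simpa using PySem.List.foldl_append_eq_flatMap (fun p => fmtClause (g p)) l w

theorem constructChainFormula_spec : Claim_equal_constructChainFormula := by
  intro originalVar solCount newVars origTotalVars invert _
  simp only [Spec_constructChainFormula, constructChainFormula, constructChainFormula_alt, getCNF]
  -- the two ports compute the same padded bit string
  rw [pad_fold]
  rw [PySem.List.length_pyRange_one]
  set binStr0 := PySem.List.slice (PySem.Int.toBinChars0b solCount) (some 2) (some (-1)) with hb0
  have hpad : (newVars - (binStr0.length : Int) - 1 - 0).toNat = (newVars - (binStr0.length : Int) - 1).toNat := by
    norm_num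
  rw [hpad]
  set binStr := List.replicate (newVars - (binStr0.length : Int) - 1).toNat '0' ++ binStr0 with hbs
  set n := binStr.length with hn
  set s : Int := if invert then -1 else 1 with hs
  set l : List (Int × Bool) := (List.range n).map
    (fun (i : Nat) => (s * ((n : Int) - (i : Int) + origTotalVars), binStr.getD (n - i - 1 : Nat) ' ' == '0')) with hl
  -- A's bit loop is foldl stepA over l
  have hA : ∀ cs : List (List Int),
      (List.range n).foldl (fun cs (i : Nat) =>
        let newVar : Int := if invert then ((n : Int) - (i : Int) + origTotalVars)
          else -1 * ((n : Int) - (i : Int) + origTotalVars)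
        if binStr.getD (n - i - 1 : Nat) ' ' == '0' then cs ++ [[-1 * newVar]]
        else pushVar (-1 * newVar) cs) cs
      = l.foldl stepA cs := by
    intro cs
    rw [hl, List.foldl_map]
    apply PySem.List.foldl_congr_mem
    intro acc x _
    cases invert <;> simp [stepA, pushVar, hs]
  -- B's bit loop is foldl stepB over l
  have hB :
      (List.range n).foldl (fun (acc : List Int × List (Int × Nat)) (i : Nat) =>
        let lit := s * ((n : Int) - (i : Int) + origTotalVars)
        if binStr.getD (n - i - 1 : Nat) ' ' == '0' then (acc.1, acc.2 ++ [(lit, acc.1.length)])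
        else (acc.1 ++ [lit], acc.2)) (([] : List Int), ([] : List (Int × Nat)))
      = l.foldl stepB ([], []) := by
    rw [hl, List.foldl_map]
    apply PySem.List.foldl_congr_mem
    intro acc x _
    simp [stepB]
  simp only [List.foldl_nil]
  rw [hA, hB, foldl_stepB, foldl_stepA]
  simp only [List.length_nil, List.nil_append]
  -- first clause of A equals B's head clause
  have hc0 : (if invert then [[-((n : Int) + 1 + origTotalVars)]] else [[(n : Int) + 1 + origTotalVars]])
      = [[s * ((n : Int) + 1 + origTotalVars)]] := by
    cases invert <;> simp [hs]
  rw [hc0]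
  rw [renderA, renderB]
  simp only [pushVar, List.map_append, List.map_map, List.map_cons, List.map_nil,
    List.length_append, List.length_cons, List.length_map, List.length_nil]
  refine Prod.ext ?_ ?_
  · show String.ofList _ = String.ofList _
    congr 1
    have hz := zidx_render l [] (-originalVar)
    simp only [List.nil_append] at hz
    simp only [List.nil_append, List.singleton_append, List.flatten_cons]
    rw [← hn]
    congr 1
    rw [← List.map_map, ← hz, List.map_map]
    rfl
  · show (0 : Int) + ((0 : Int) + 1 + ((zcl l).length : Int)) = 1 + ((zidx 0 l).length : Int)
    rw [zidx_length]
    omega
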